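-- pv_equiv track=rewrite | github.com/TranHuyTiep/DAMH | mqtt_client/can_bac_hai_ecc.py | tinh_luy_thua_F
-- ===== SOURCE A (Python) =====
-- def division(a,b,q,p):
--     t0 = (a[0] * b[0]) % p
--     t1 = (a[0] * b[1] + a[1] * b[0]) % p
--     t2 = (a[1] * b[1]) % p
--     c1 = (t1 - (q[1]*t2)) % p
--     c0 = (t0 - (q[0]*t2)) % p
--     return (c0,c1)
--
-- def tinh_luy_thua_F(e,a,q,p):
--     result = [1,0]
--     sq = a
--     while e != 0:
--         if(e%2 == 1):
--             result = division(a,result,q,p)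
--             e = (e-1)
--         a = division(a, a, q, p)
--         e = e//2
--
--     return result
-- ===== SOURCE B (Python) =====
-- def division(a, b, q, p):
--     t0 = (a[0] * b[0]) % p
--     t1 = (a[0] * b[1] + a[1] * b[0]) % p
--     t2 = (a[1] * b[1]) % p
--     c1 = (t1 - (q[1] * t2)) % p
--     c0 = (t0 - (q[0] * t2)) % p
--     return (c0, c1)
--
-- def tinh_luy_thua_F(e, a, q, p):
--     if e == 0:
--         return [1, 0]
--     half = tinh_luy_thua_F(e // 2, a, q, p)
--     sq = division(half, half, q, p)
--     if e % 2 == 1: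
--         return division(a, sq, q, p)
--     return sq
-- ===== Notes on version B (the rewrite author's own statement) =====
-- stated objective: alternative
-- what changed: Replaced the iterative bit-scanning while-loop with a running accumulator and squared base by recursive divide-and-conquer exponentiation-by-squaring on the halved exponent.
import Mathlib
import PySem

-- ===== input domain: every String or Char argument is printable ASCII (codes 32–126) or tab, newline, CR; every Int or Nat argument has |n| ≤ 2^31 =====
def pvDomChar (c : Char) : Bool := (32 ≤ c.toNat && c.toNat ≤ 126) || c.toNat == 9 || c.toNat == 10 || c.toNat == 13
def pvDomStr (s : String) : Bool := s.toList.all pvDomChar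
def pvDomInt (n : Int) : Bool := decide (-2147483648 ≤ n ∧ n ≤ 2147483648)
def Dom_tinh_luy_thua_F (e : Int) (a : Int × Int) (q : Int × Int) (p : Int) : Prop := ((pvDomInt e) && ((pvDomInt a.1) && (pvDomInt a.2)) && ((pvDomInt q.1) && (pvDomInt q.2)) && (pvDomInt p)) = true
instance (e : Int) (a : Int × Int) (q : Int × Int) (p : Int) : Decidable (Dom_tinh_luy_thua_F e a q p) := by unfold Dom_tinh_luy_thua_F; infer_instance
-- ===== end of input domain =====

-- B replaces A's iterative square-and-multiply loop with recursive divide-and-conquer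
-- exponentiation-by-squaring (objective: alternative decomposition, same asymptotic cost).

-- ===== PORT A =====
def division (a b : Int × Int) (q : Int × Int) (p : Int) : Int × Int :=
  let t0 := PySem.Int.mod (a.1 * b.1) p
  let t1 := PySem.Int.mod (a.1 * b.2 + a.2 * b.1) p
  let t2 := PySem.Int.mod (a.2 * b.2) p
  let c1 := PySem.Int.mod (t1 - q.2 * t2) p
  let c0 := PySem.Int.mod (t0 - q.1 * t2) p
  (c0, c1)

-- the while-loop of A, state (e, a, result); the '0 < e' guard only totalizes the
-- function (Python diverges for e < 0, which Pre_ excludes)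
def tinhLoopA (e : Int) (a result : Int × Int) (q : Int × Int) (p : Int) : Int × Int :=
  if h : 0 < e then
    if PySem.Int.mod e 2 = 1 then
      tinhLoopA (PySem.Int.floordiv (e - 1) 2) (division a a q p) (division a result q p) q p
    else
      tinhLoopA (PySem.Int.floordiv e 2) (division a a q p) result q p
  else result
termination_by e.toNat
decreasing_by
  · rw [PySem.Int.floordiv_eq_ediv_of_pos (by omega)]; omega
  · rw [PySem.Int.floordiv_eq_ediv_of_pos (by omega)]; omega

def tinh_luy_thua_F (e : Int) (a : Int × Int) (q : Int × Int) (p : Int) : Int × Int :=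
  tinhLoopA e a (1, 0) q p

-- ===== PORT B =====
-- recursive exponentiation-by-squaring; the 'e < 0' guard only totalizes the function
-- (Python's B hits RecursionError there, which Pre_ excludes)
def tinh_luy_thua_F_alt (e : Int) (a : Int × Int) (q : Int × Int) (p : Int) : Int × Int :=
  if e = 0 then (1, 0)
  else if e < 0 then (1, 0)
  else
    let half := tinh_luy_thua_F_alt (PySem.Int.floordiv e 2) a q p
    let sq := division half half q p
    if PySem.Int.mod e 2 = 1 then division a sq q p else sq
termination_by e.toNat
decreasing_by
  rw [PySem.Int.floordiv_eq_ediv_of_pos (by omega)]; omega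

-- ===== PRECONDITION & SPEC =====
-- Pre_ excludes e < 0 (A's while-loop never terminates there) and p = 0 with e ≠ 0
-- (A raises ZeroDivisionError in division); everywhere else A returns normally.
def Pre_tinh_luy_thua_F (e : Int) (a : Int × Int) (q : Int × Int) (p : Int) : Prop :=
  0 ≤ e ∧ (e = 0 ∨ p ≠ 0)
instance (e : Int) (a : Int × Int) (q : Int × Int) (p : Int) : Decidable (Pre_tinh_luy_thua_F e a q p) := by unfold Pre_tinh_luy_thua_F; infer_instance
def pvWitness_tinh_luy_thua_F : Int × (Int × Int) × (Int × Int) × Int := (5, (2, 3), (1, 1), 7)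

def Spec_tinh_luy_thua_F (e : Int) (a : Int × Int) (q : Int × Int) (p : Int) (out : Int × Int) : Prop := out = tinh_luy_thua_F_alt e a q p
instance (e : Int) (a : Int × Int) (q : Int × Int) (p : Int) (out : Int × Int) : Decidable (Spec_tinh_luy_thua_F e a q p out) := by unfold Spec_tinh_luy_thua_F; infer_instance

-- ===== CLAIM (what is proved, stated in full; the proofs are below) =====
def Claim_equal_tinh_luy_thua_F : Prop := ∀ (e : Int) (a : Int × Int) (q : Int × Int) (p : Int), Dom_tinh_luy_thua_F e a q p → Pre_tinh_luy_thua_F e a q p → Spec_tinh_luy_thua_F e a q p (tinh_luy_thua_F e a q p)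

-- ===== LEMMAS AND PROOFS =====

-- multiplication in Z[x]/(x^2 + q.2 x + q.1) on degree-≤1 representatives, no mod
def mulZ (q : Int × Int) (x y : Int × Int) : Int × Int :=
  (x.1 * y.1 - q.1 * (x.2 * y.2), x.1 * y.2 + x.2 * y.1 - q.2 * (x.2 * y.2))

def redP (p : Int) (x : Int × Int) : Int × Int := (PySem.Int.mod x.1 p, PySem.Int.mod x.2 p)

def powZ (q : Int × Int) (a : Int × Int) : Nat → Int × Int
  | 0 => (1, 0)
  | n + 1 => mulZ q a (powZ q a n)

def Cong (p : Int) (x y : Int × Int) : Prop := p ∣ (x.1 - y.1) ∧ p ∣ (x.2 - y.2)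

theorem pv_mod_congr (x y b : Int) (h : b ∣ x - y) : PySem.Int.mod x b = PySem.Int.mod y b := by
  rcases eq_or_ne b 0 with rfl | hb
  · obtain rfl : x = y := by omega
    rfl
  · have hx := PySem.Int.floordiv_mul_add_mod x b
    have hy := PySem.Int.floordiv_mul_add_mod y b
    obtain ⟨k, hk⟩ := h
    have hmx : PySem.Int.mod x b = x - PySem.Int.floordiv x b * b := by linarith
    have hmy : PySem.Int.mod y b = y - PySem.Int.floordiv y b * b := by linarith
    have hd : PySem.Int.mod x b - PySem.Int.mod y b
        = b * (k - PySem.Int.floordiv x b + PySem.Int.floordiv y b) := by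
      rw [hmx, hmy]; linear_combination hk
    have hdvd : b ∣ PySem.Int.mod x b - PySem.Int.mod y b := ⟨_, hd⟩
    rcases lt_or_gt_of_ne hb with hneg | hpos
    · have h1 := PySem.Int.mod_neg_bounds (a := x) hneg
      have h2 := PySem.Int.mod_neg_bounds (a := y) hneg
      have hdvd' : -b ∣ PySem.Int.mod x b - PySem.Int.mod y b := (neg_dvd).mpr hdvd
      have habs : |PySem.Int.mod x b - PySem.Int.mod y b| < -b := by
        rw [abs_lt]; constructor <;> omega
      have := Int.eq_zero_of_abs_lt_dvd hdvd' habs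
      omega
    · have h1n := PySem.Int.mod_nonneg (a := x) hpos
      have h1l := PySem.Int.mod_lt (a := x) hpos
      have h2n := PySem.Int.mod_nonneg (a := y) hpos
      have h2l := PySem.Int.mod_lt (a := y) hpos
      have habs : |PySem.Int.mod x b - PySem.Int.mod y b| < b := by
        rw [abs_lt]; constructor <;> omega
      have := Int.eq_zero_of_abs_lt_dvd hdvd habs
      omega

theorem pv_mod_sub_self (x b : Int) : b ∣ PySem.Int.mod x b - x :=
  ⟨-(PySem.Int.floordiv x b), by linear_combination PySem.Int.floordiv_mul_add_mod x b⟩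

theorem pvCong_refl (p : Int) (x : Int × Int) : Cong p x x := ⟨by simp, by simp⟩

theorem pvCong_trans {p : Int} {x y z : Int × Int} (h1 : Cong p x y) (h2 : Cong p y z) : Cong p x z :=
  ⟨by have := dvd_add h1.1 h2.1; simpa using this, by have := dvd_add h1.2 h2.2; simpa using this⟩

theorem pvCong_red (p : Int) (x : Int × Int) : Cong p (redP p x) x :=
  ⟨pv_mod_sub_self x.1 p, pv_mod_sub_self x.2 p⟩

theorem pvRed_congr {p : Int} {x y : Int × Int} (h : Cong p x y) : redP p x = redP p y := by
  unfold redP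
  rw [pv_mod_congr x.1 y.1 p h.1, pv_mod_congr x.2 y.2 p h.2]

theorem pvMul_congr {p : Int} (q : Int × Int) {x x' y y' : Int × Int}
    (hx : Cong p x x') (hy : Cong p y y') : Cong p (mulZ q x y) (mulZ q x' y') := by
  obtain ⟨k1, hk1⟩ := hx.1; obtain ⟨k2, hk2⟩ := hx.2
  obtain ⟨l1, hl1⟩ := hy.1; obtain ⟨l2, hl2⟩ := hy.2
  constructor
  · exact ⟨k1 * y.1 + x'.1 * l1 - q.1 * (k2 * y.2 + x'.2 * l2), by
      simp only [mulZ]; linear_combination (y.1 * hk1 + x'.1 * hl1 - q.1 * y.2 * hk2 - q.1 * x'.2 * hl2)⟩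
  · exact ⟨k1 * y.2 + x'.1 * l2 + k2 * y.1 + x'.2 * l1 - q.2 * (k2 * y.2 + x'.2 * l2), by
      simp only [mulZ]; linear_combination (y.2 * hk1 + x'.1 * hl2 + y.1 * hk2 + x'.2 * hl1 - q.2 * y.2 * hk2 - q.2 * x'.2 * hl2)⟩

theorem pvMulZ_assoc (q x y z : Int × Int) : mulZ q (mulZ q x y) z = mulZ q x (mulZ q y z) := by
  simp only [mulZ, Prod.mk.injEq]; constructor <;> ring

theorem pvMulZ_comm (q x y : Int × Int) : mulZ q x y = mulZ q y x := by
  simp only [mulZ, Prod.mk.injEq]; constructor <;> ring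

theorem pvMulZ_one (q x : Int × Int) : mulZ q x (1, 0) = x := by
  simp [mulZ]

theorem pvDivision_eq (a b q : Int × Int) (p : Int) :
    division a b q p = redP p (mulZ q a b) := by
  unfold division redP mulZ
  simp only [Prod.mk.injEq]
  constructor
  · exact pv_mod_congr _ _ p (by
      obtain ⟨u, hu⟩ := pv_mod_sub_self (a.1 * b.1) p
      obtain ⟨v, hv⟩ := pv_mod_sub_self (a.2 * b.2) p
      exact ⟨u - q.1 * v, by linear_combination hu - q.1 * hv⟩)
  · exact pv_mod_congr _ _ p (by
      obtain ⟨u, hu⟩ := pv_mod_sub_self (a.1 * b.2 + a.2 * b.1) p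
      obtain ⟨v, hv⟩ := pv_mod_sub_self (a.2 * b.2) p
      exact ⟨u - q.2 * v, by linear_combination hu - q.2 * hv⟩)

theorem pvPow_congr {p : Int} (q : Int × Int) {a b : Int × Int} (h : Cong p a b) :
    ∀ n, Cong p (powZ q a n) (powZ q b n)
  | 0 => pvCong_refl p (1, 0)
  | n + 1 => pvMul_congr q h (pvPow_congr q h n)

theorem pvPow_add (q a : Int × Int) (m n : Nat) :
    mulZ q (powZ q a m) (powZ q a n) = powZ q a (m + n) := by
  induction m with
  | zero =>
      show mulZ q (1, 0) (powZ q a n) = powZ q a (0 + n)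
      rw [pvMulZ_comm, pvMulZ_one]
      congr 1
      omega
  | succ k ih =>
      show mulZ q (mulZ q a (powZ q a k)) (powZ q a n) = powZ q a (k + 1 + n)
      rw [pvMulZ_assoc, ih, show k + 1 + n = (k + n) + 1 from by omega]
      rfl

theorem pvPow_sq (q a : Int × Int) (k : Nat) : powZ q (mulZ q a a) k = powZ q a (2 * k) := by
  induction k with
  | zero => rfl
  | succ m ih =>
      show mulZ q (mulZ q a a) (powZ q (mulZ q a a) m) = powZ q a (2 * (m + 1))
      rw [ih, pvMulZ_assoc, show 2 * (m + 1) = 2 * m + 1 + 1 from by omega]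
      rfl

-- A's loop computes result * a^e, reduced
theorem loopA_eq (q : Int × Int) (p : Int) :
    ∀ n (e : Int), e.toNat = n → 0 < e → ∀ (a r : Int × Int),
      tinhLoopA e a r q p = redP p (mulZ q (powZ q a e.toNat) r) := by
  intro n
  induction n using Nat.strong_induction_on with
  | _ n ih =>
    intro e hn he a r
    rw [tinhLoopA]
    have h2 : (0:Int) < 2 := by omega
    have hmn := PySem.Int.mod_nonneg (a := e) h2
    have hml := PySem.Int.mod_lt (a := e) h2
    have hfd := PySem.Int.floordiv_mul_add_mod e 2
    simp only [he, dif_pos]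
    by_cases hodd : PySem.Int.mod e 2 = 1
    · simp only [hodd, if_pos]
      have he2 : PySem.Int.floordiv (e - 1) 2 = PySem.Int.floordiv e 2 := by
        rw [PySem.Int.floordiv_eq_ediv_of_pos h2, PySem.Int.floordiv_eq_ediv_of_pos h2]
        omega
      rw [he2]
      generalize hf : PySem.Int.floordiv e 2 = f
      rw [hf] at hfd
      have hef : e = 2 * f + 1 := by omega
      by_cases hf0 : f = 0
      · have he1 : e = 1 := by omega
        subst he1
        rw [hf0]
        rw [tinhLoopA]
        simp only [show ¬ (0:Int) < 0 from by omega, dif_neg, not_false_iff]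
        rw [pvDivision_eq]
        show redP p (mulZ q a r) = redP p (mulZ q (powZ q a (Int.toNat 1)) r)
        have : powZ q a (Int.toNat 1) = a := by
          show mulZ q a (1,0) = a
          exact pvMulZ_one q a
        rw [this]
      · have hfpos : 0 < f := by omega
        have hlt : f.toNat < n := by omega
        rw [ih f.toNat hlt f rfl hfpos]
        rw [pvDivision_eq, pvDivision_eq]
        -- LHS: red (mul (pow (red (a*a)) f) (red (a*r)))
        have c1 : Cong p (powZ q (redP p (mulZ q a a)) f.toNat) (powZ q a (2 * f.toNat)) := by
          have := pvPow_congr q (pvCong_red p (mulZ q a a)) f.toNat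
          rw [pvPow_sq] at this
          exact this
        have c2 : Cong p (mulZ q (powZ q (redP p (mulZ q a a)) f.toNat) (redP p (mulZ q a r)))
            (mulZ q (powZ q a (2 * f.toNat)) (mulZ q a r)) :=
          pvMul_congr q c1 (pvCong_red p (mulZ q a r))
        rw [pvRed_congr c2]
        congr 1
        rw [show mulZ q (powZ q a (2 * f.toNat)) (mulZ q a r)
            = mulZ q (mulZ q (powZ q a (2 * f.toNat)) a) r from (pvMulZ_assoc _ _ _ _).symm]
        congr 1
        rw [pvMulZ_comm q _ a]
        show mulZ q a (powZ q a (2 * f.toNat)) = powZ q a e.toNat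
        have : e.toNat = 2 * f.toNat + 1 := by omega
        rw [this]
        rfl
    · have hm0 : PySem.Int.mod e 2 = 0 := by omega
      simp only [hodd, if_neg, not_false_iff]
      generalize hf : PySem.Int.floordiv e 2 = f
      rw [hf] at hfd
      have hef : e = 2 * f := by omega
      have hfpos : 0 < f := by omega
      have hlt : f.toNat < n := by omega
      rw [ih f.toNat hlt f rfl hfpos]
      rw [pvDivision_eq]
      have c1 : Cong p (powZ q (redP p (mulZ q a a)) f.toNat) (powZ q a (2 * f.toNat)) := by
        have := pvPow_congr q (pvCong_red p (mulZ q a a)) f.toNat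
        rw [pvPow_sq] at this
        exact this
      have c2 : Cong p (mulZ q (powZ q (redP p (mulZ q a a)) f.toNat) r)
          (mulZ q (powZ q a (2 * f.toNat)) r) := pvMul_congr q c1 (pvCong_refl p r)
      rw [show e.toNat = 2 * f.toNat from by omega, pvRed_congr c2]

-- B computes a^e, reduced
theorem altB_eq (q : Int × Int) (p : Int) :
    ∀ n (e : Int), e.toNat = n → 0 < e → ∀ (a : Int × Int),
      tinh_luy_thua_F_alt e a q p = redP p (powZ q a e.toNat) := by
  intro n
  induction n using Nat.strong_induction_on with
  | _ n ih =>
    intro e hn he a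
    rw [tinh_luy_thua_F_alt]
    have h2 : (0:Int) < 2 := by omega
    have hmn := PySem.Int.mod_nonneg (a := e) h2
    have hml := PySem.Int.mod_lt (a := e) h2
    have hfd := PySem.Int.floordiv_mul_add_mod e 2
    simp only [show e ≠ 0 from by omega, if_neg, not_false_iff,
      show ¬ e < 0 from by omega]
    generalize hf : PySem.Int.floordiv e 2 = f
    rw [hf] at hfd
    by_cases hf0 : f = 0
    · have he1 : e = 1 := by omega
      subst he1
      rw [hf0]
      rw [tinh_luy_thua_F_alt]
      simp only [if_pos]
      have hodd : PySem.Int.mod (1:Int) 2 = 1 := by omega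
      simp only [hodd, if_pos]
      rw [pvDivision_eq, pvDivision_eq]
      have c0 : Cong p (redP p (mulZ q (1,0) (1,0))) ((1,0) : Int × Int) :=
        pvCong_trans (pvCong_red p _) (by rw [pvMulZ_one]; exact pvCong_refl p _)
      have c1 : Cong p (mulZ q a (redP p (mulZ q (1,0) (1,0)))) (mulZ q a (1,0)) :=
        pvMul_congr q (pvCong_refl p a) c0
      rw [pvRed_congr c1, pvMulZ_one]
      show redP p a = redP p (powZ q a (Int.toNat 1))
      have : powZ q a (Int.toNat 1) = a := pvMulZ_one q a
      rw [this]
    · have hfpos : 0 < f := by omega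
      have hlt : f.toNat < n := by omega
      rw [ih f.toNat hlt f rfl hfpos]
      rw [pvDivision_eq, pvDivision_eq]
      have chalf : Cong p (mulZ q (redP p (powZ q a f.toNat)) (redP p (powZ q a f.toNat)))
          (powZ q a (2 * f.toNat)) := by
        have := pvMul_congr q (pvCong_red p (powZ q a f.toNat)) (pvCong_red p (powZ q a f.toNat))
        rw [pvPow_add q a f.toNat f.toNat] at this
        have h2f : f.toNat + f.toNat = 2 * f.toNat := by omega
        rwa [h2f] at this
      by_cases hodd : PySem.Int.mod e 2 = 1
      · simp only [hodd, if_pos]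
        have c1 : Cong p (mulZ q a (redP p (mulZ q (redP p (powZ q a f.toNat)) (redP p (powZ q a f.toNat)))))
            (mulZ q a (powZ q a (2 * f.toNat))) :=
          pvMul_congr q (pvCong_refl p a) (pvCong_trans (pvCong_red p _) chalf)
        rw [pvRed_congr c1]
        have : e.toNat = 2 * f.toNat + 1 := by omega
        rw [this]
        rfl
      · have hm0 : PySem.Int.mod e 2 = 0 := by omega
        simp only [hodd, if_neg, not_false_iff]
        rw [show e.toNat = 2 * f.toNat from by omega, pvRed_congr chalf]

-- ===== VERDICT (by name: the statement is the Claim_ definition above) =====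
theorem tinh_luy_thua_F_spec : Claim_equal_tinh_luy_thua_F := by
  intro e a q p _hdom hpre
  unfold Spec_tinh_luy_thua_F tinh_luy_thua_F
  rcases eq_or_lt_of_le hpre.1 with h0 | hpos
  · rw [← h0]
    rw [tinhLoopA, tinh_luy_thua_F_alt]
    simp
  · rw [loopA_eq q p e.toNat e rfl hpos a (1, 0),
      altB_eq q p e.toNat e rfl hpos a, pvMulZ_one]
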